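-- pv_equiv track=rewrite | github.com/WintWah1712/MiniBank_MongoDB | Client.py | validPasscode
-- ===== SOURCE A (Python) =====
-- def validPasscode(passcode):
--     # to check length
--     if not len(passcode) <= 10 and not len(passcode) >= 6:
--         return False
--     # to check space
--     for i in passcode:
--         if i == chr(32):
--             return False
--     # to check digit 0-9
--     if True:
--         count = 0
--         for i in passcode:
--             if i >= chr(48) and i <= chr(57):
--                 count = 1
--         if count == 0:
--             return False
--     # to check special character
--     if True:
--         count = 0
--         for i in passcode:
--             if i >= chr(33) and i <= chr(47) or i >= chr(58) and i <= chr(64) or i >= chr(91) and i <= chr(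
--                 96) or i >= chr(123) and i <= chr(126):
--                 count = 1
--         if count == 0:
--             return False
--     # to check capital letters
--     if True:
--         count = 0
--         for i in passcode:
--             if i >= chr(65) and i <= chr(90):
--                 count = 1
--         if count == 0:
--             return False
--     # to check small letters
--     if True:
--         count = 0
--         for i in passcode:
--             if i >= chr(97) and i <= chr(122):
--                 count = 1
--         if count == 0:
--             return False
--     # if all conditions fail
--     return True
-- ===== SOURCE B (Python) =====
-- def validPasscode(passcode):
--     # Single pass: classify each character by code point into flags; reject on space.
--     has_digit = has_special = has_upper = has_lower = False
--     for c in passcode: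
--         n = ord(c)
--         if n == 32:
--             return False
--         elif 48 <= n <= 57:
--             has_digit = True
--         elif 65 <= n <= 90:
--             has_upper = True
--         elif 97 <= n <= 122:
--             has_lower = True
--         elif 33 <= n <= 47 or 58 <= n <= 64 or 91 <= n <= 96 or 123 <= n <= 126:
--             has_special = True
--     return has_digit and has_special and has_upper and has_lower
-- ===== Notes on version B (the rewrite author's own statement) =====
-- stated objective: simpler
-- what changed: Replaces A's five separate scans (dead length check, space scan, then four counter loops each re-scanning the whole string) by a single pass that classifies each character's code point into four boolean category flags and rejects immediately on a space.
import Mathlib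
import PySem

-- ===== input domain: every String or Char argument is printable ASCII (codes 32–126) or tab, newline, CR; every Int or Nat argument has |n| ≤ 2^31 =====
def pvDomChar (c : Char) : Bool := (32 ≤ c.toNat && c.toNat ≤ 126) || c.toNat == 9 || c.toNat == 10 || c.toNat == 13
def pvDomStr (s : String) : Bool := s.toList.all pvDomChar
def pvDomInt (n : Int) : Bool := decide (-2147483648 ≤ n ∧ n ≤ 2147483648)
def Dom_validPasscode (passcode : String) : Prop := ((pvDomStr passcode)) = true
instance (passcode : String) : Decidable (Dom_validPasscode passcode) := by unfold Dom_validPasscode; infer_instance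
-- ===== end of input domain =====

-- B replaces A's five separate scans (dead length check, space scan, four counter loops)
-- by ONE pass setting four boolean category flags; same return value on every input.

-- ===== PORT A =====
-- Literal transliteration: dead length check, a space scan (early return), then four
-- counter loops each scanning the whole string; char comparisons are by code point,
-- exactly Python's rule for ASCII strings.
def validPasscode (passcode : String) : Bool :=
  let cs := passcode.toList
  if !decide (cs.length ≤ 10) && !decide (cs.length ≥ 6) then false
  else if cs.any (fun c => c == Char.ofNat 32) then false
  else if (cs.foldl (fun count c => if 48 ≤ c.toNat && c.toNat ≤ 57 then 1 else count) (0 : Nat)) == 0 then false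
  else if (cs.foldl (fun count c =>
      if (33 ≤ c.toNat && c.toNat ≤ 47) || (58 ≤ c.toNat && c.toNat ≤ 64) ||
         (91 ≤ c.toNat && c.toNat ≤ 96) || (123 ≤ c.toNat && c.toNat ≤ 126)
      then 1 else count) (0 : Nat)) == 0 then false
  else if (cs.foldl (fun count c => if 65 ≤ c.toNat && c.toNat ≤ 90 then 1 else count) (0 : Nat)) == 0 then false
  else if (cs.foldl (fun count c => if 97 ≤ c.toNat && c.toNat ≤ 122 then 1 else count) (0 : Nat)) == 0 then false
  else true

-- ===== PORT B =====
-- Single pass carrying four flags (digit, upper, lower, special); space aborts with false.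
def altGo : List Char → Bool → Bool → Bool → Bool → Bool
  | [], d, u, l, s => d && s && u && l
  | c :: cs, d, u, l, s =>
    let n := c.toNat
    if n == 32 then false
    else if 48 ≤ n && n ≤ 57 then altGo cs true u l s
    else if 65 ≤ n && n ≤ 90 then altGo cs d true l s
    else if 97 ≤ n && n ≤ 122 then altGo cs d u true s
    else if (33 ≤ n && n ≤ 47) || (58 ≤ n && n ≤ 64) || (91 ≤ n && n ≤ 96) || (123 ≤ n && n ≤ 126)
         then altGo cs d u l true
    else altGo cs d u l s

def validPasscode_alt (passcode : String) : Bool :=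
  altGo passcode.toList false false false false

-- ===== PRECONDITION & SPEC =====
def Spec_validPasscode (passcode : String) (out : Bool) : Prop := out = validPasscode_alt passcode
instance (passcode : String) (out : Bool) : Decidable (Spec_validPasscode passcode out) := by unfold Spec_validPasscode; infer_instance

-- ===== CLAIM (what is proved, stated in full; the proofs are below) =====
def Claim_equal_validPasscode : Prop := ∀ (passcode : String), Dom_validPasscode passcode → Spec_validPasscode passcode (validPasscode passcode)

-- ===== LEMMAS AND PROOFS =====

lemma foldl_flag (P : Char → Bool) : ∀ (cs : List Char) (n : Nat),
    cs.foldl (fun count c => if P c then 1 else count) n = if cs.any P then 1 else n := by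
  intro cs
  induction cs with
  | nil => intro n; simp
  | cons c cs ih =>
    intro n
    by_cases h : P c = true <;> simp [List.foldl, h, ih]

lemma space_pred (c : Char) : (c == Char.ofNat 32) = (c.toNat == 32) := by
  by_cases h : c = Char.ofNat 32
  · subst h; decide
  · have h' : c.toNat ≠ 32 := by
      intro hn
      have h32v : (Char.ofNat 32).toNat = 32 := by decide
      exact h (Char.ext (UInt32.toNat_inj.mp (hn.trans h32v.symm)))
    have l1 : (c == Char.ofNat 32) = false := by simpa using h
    have l2 : (c.toNat == 32) = false := by simpa using h'
    rw [l1, l2]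

lemma altGo_eq : ∀ (cs : List Char) (d u l s : Bool),
    altGo cs d u l s =
      if cs.any (fun c => c.toNat == 32) then false
      else ((d || cs.any (fun c => 48 ≤ c.toNat && c.toNat ≤ 57)) &&
            (s || cs.any (fun c => (33 ≤ c.toNat && c.toNat ≤ 47) || (58 ≤ c.toNat && c.toNat ≤ 64) ||
                                   (91 ≤ c.toNat && c.toNat ≤ 96) || (123 ≤ c.toNat && c.toNat ≤ 126))) &&
            (u || cs.any (fun c => 65 ≤ c.toNat && c.toNat ≤ 90)) &&
            (l || cs.any (fun c => 97 ≤ c.toNat && c.toNat ≤ 122))) := by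
  intro cs
  induction cs with
  | nil => intro d u l s; simp [altGo]
  | cons c cs ih =>
    intro d u l s
    simp only [altGo, List.any_cons]
    by_cases h32 : (c.toNat == 32) = true
    · simp [h32]
    · have h32' : (c.toNat == 32) = false := by simpa using h32
      rw [if_neg h32]
      by_cases hd : (48 ≤ c.toNat && c.toNat ≤ 57) = true
      · have hd' := hd; simp only [Bool.and_eq_true, decide_eq_true_eq] at hd'
        have e1 : (65 ≤ c.toNat && c.toNat ≤ 90) = false := by simp; omega
        have e2 : (97 ≤ c.toNat && c.toNat ≤ 122) = false := by simp; omega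
        have e3 : ((33 ≤ c.toNat && c.toNat ≤ 47) || (58 ≤ c.toNat && c.toNat ≤ 64) ||
                   (91 ≤ c.toNat && c.toNat ≤ 96) || (123 ≤ c.toNat && c.toNat ≤ 126)) = false := by
          simp; omega
        simp [ih, h32', hd, e1, e2, e3]
      · have hd0 : (48 ≤ c.toNat && c.toNat ≤ 57) = false := by simpa using hd
        rw [if_neg hd]
        by_cases hu : (65 ≤ c.toNat && c.toNat ≤ 90) = true
        · have hu' := hu; simp only [Bool.and_eq_true, decide_eq_true_eq] at hu'
          have e2 : (97 ≤ c.toNat && c.toNat ≤ 122) = false := by simp; omega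
          have e3 : ((33 ≤ c.toNat && c.toNat ≤ 47) || (58 ≤ c.toNat && c.toNat ≤ 64) ||
                     (91 ≤ c.toNat && c.toNat ≤ 96) || (123 ≤ c.toNat && c.toNat ≤ 126)) = false := by
            simp; omega
          simp [ih, h32', hd0, hu, e2, e3]
        · have hu0 : (65 ≤ c.toNat && c.toNat ≤ 90) = false := by simpa using hu
          rw [if_neg hu]
          by_cases hl : (97 ≤ c.toNat && c.toNat ≤ 122) = true
          · have hl' := hl; simp only [Bool.and_eq_true, decide_eq_true_eq] at hl'
            have e3 : ((33 ≤ c.toNat && c.toNat ≤ 47) || (58 ≤ c.toNat && c.toNat ≤ 64) ||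
                       (91 ≤ c.toNat && c.toNat ≤ 96) || (123 ≤ c.toNat && c.toNat ≤ 126)) = false := by
              simp; omega
            simp [ih, h32', hd0, hu0, hl, e3]
          · have hl0 : (97 ≤ c.toNat && c.toNat ≤ 122) = false := by simpa using hl
            rw [if_neg hl]
            by_cases hs : ((33 ≤ c.toNat && c.toNat ≤ 47) || (58 ≤ c.toNat && c.toNat ≤ 64) ||
                           (91 ≤ c.toNat && c.toNat ≤ 96) || (123 ≤ c.toNat && c.toNat ≤ 126)) = true
            · simp [ih, h32', hd0, hu0, hl0, hs]
            · have hs0 : ((33 ≤ c.toNat && c.toNat ≤ 47) || (58 ≤ c.toNat && c.toNat ≤ 64) ||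
                          (91 ≤ c.toNat && c.toNat ≤ 96) || (123 ≤ c.toNat && c.toNat ≤ 126)) = false := by
                simpa using hs
              rw [if_neg hs]
              simp [ih, h32', hd0, hu0, hl0, hs0]

theorem validPasscode_eq_alt (passcode : String) :
    validPasscode passcode = validPasscode_alt passcode := by
  simp only [validPasscode, validPasscode_alt]
  have hlen : (!decide (passcode.toList.length ≤ 10) && !decide (passcode.toList.length ≥ 6)) = false := by
    simp only [String.length_toList]
    by_cases h : passcode.length ≤ 10
    · simp [h]
    · have h6 : 6 ≤ passcode.length := by omega
      simp [h6]
  rw [hlen]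
  simp only [Bool.false_eq_true, if_false]
  have hsp : (fun c => c == Char.ofNat 32) = (fun c : Char => c.toNat == 32) := funext space_pred
  rw [hsp, altGo_eq,
      foldl_flag (fun c : Char => 48 ≤ c.toNat && c.toNat ≤ 57),
      foldl_flag (fun c : Char => (33 ≤ c.toNat && c.toNat ≤ 47) || (58 ≤ c.toNat && c.toNat ≤ 64) ||
         (91 ≤ c.toNat && c.toNat ≤ 96) || (123 ≤ c.toNat && c.toNat ≤ 126)),
      foldl_flag (fun c : Char => 65 ≤ c.toNat && c.toNat ≤ 90),
      foldl_flag (fun c : Char => 97 ≤ c.toNat && c.toNat ≤ 122)]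
  by_cases h0 : passcode.toList.any (fun c : Char => c.toNat == 32) <;>
  by_cases h1 : passcode.toList.any (fun c : Char => 48 ≤ c.toNat && c.toNat ≤ 57) <;>
  by_cases h2 : passcode.toList.any (fun c : Char => (33 ≤ c.toNat && c.toNat ≤ 47) || (58 ≤ c.toNat && c.toNat ≤ 64) ||
         (91 ≤ c.toNat && c.toNat ≤ 96) || (123 ≤ c.toNat && c.toNat ≤ 126)) <;>
  by_cases h3 : passcode.toList.any (fun c : Char => 65 ≤ c.toNat && c.toNat ≤ 90) <;>
  by_cases h4 : passcode.toList.any (fun c : Char => 97 ≤ c.toNat && c.toNat ≤ 122) <;>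
  simp [h0, h1, h2, h3, h4]

-- ===== VERDICT (by name: the statement is the Claim_ definition above) =====
theorem validPasscode_spec : Claim_equal_validPasscode := by
  intro passcode _
  exact validPasscode_eq_alt passcode
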